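-- pv_equiv track=rewrite | github.com/zenterra-services/Prof_BrainRot | fix_specific_issues.py | fix_unused_imports_specific
-- ===== SOURCE A (Python) =====
-- def fix_unused_imports_specific(content, unused_modules):
--     """Remove specific unused imports"""
--     lines = content.split('\n')
--     cleaned_lines = lines.copy()
--
--     for module in unused_modules:
--         for i, line in enumerate(cleaned_lines):
--             if line.strip() == f'import {module}':
--                 cleaned_lines[i] = ''
--                 break
--             elif line.strip().startswith(f'from {module} '):
--                 cleaned_lines[i] = ''
--                 break
--
--     return '\n'.join(cleaned_lines)
-- ===== SOURCE B (Python) =====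
-- def fix_unused_imports_specific(content, unused_modules):
--     """Remove specific unused imports: one pass over the lines, driven by a per-module budget"""
--     budget = {}
--     for m in unused_modules:
--         budget[m] = budget.get(m, 0) + 1
--     out = []
--     for line in content.split('\n'):
--         s = line.strip()
--         mod = None
--         if s.startswith('import '):
--             mod = s[7:]
--         elif s.startswith('from '):
--             rest = s[5:]
--             j = rest.find(' ')
--             if j != -1:
--                 mod = rest[:j]
--         if mod is not None and budget.get(mod, 0) > 0:
--             budget[mod] -= 1
--             out.append('')
--         else:
--             out.append(line)
--     return '\n'.join(out)
-- ===== Notes on version B (the rewrite author's own statement) =====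
-- stated objective: faster
-- what changed: A rescans the whole line list once per module (blanking the first matching line each time); B builds a per-module budget counter once and makes a single pass over the lines, blanking a line when its derived candidate module still has budget.
import Mathlib
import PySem

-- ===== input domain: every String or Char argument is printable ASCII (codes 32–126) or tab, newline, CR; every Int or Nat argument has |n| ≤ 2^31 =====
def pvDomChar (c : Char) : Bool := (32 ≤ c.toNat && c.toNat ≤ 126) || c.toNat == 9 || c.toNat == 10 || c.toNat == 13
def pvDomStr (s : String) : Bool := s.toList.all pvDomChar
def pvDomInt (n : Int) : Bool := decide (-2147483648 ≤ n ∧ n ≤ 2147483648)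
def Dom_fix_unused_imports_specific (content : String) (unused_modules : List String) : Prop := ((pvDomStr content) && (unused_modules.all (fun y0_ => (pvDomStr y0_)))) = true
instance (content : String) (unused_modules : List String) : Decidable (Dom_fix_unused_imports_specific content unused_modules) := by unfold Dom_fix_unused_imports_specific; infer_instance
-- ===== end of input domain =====

-- B replaces A's per-module rescans of the line list by ONE pass over the lines driven by a
-- per-module budget counter (simpler/faster single pass; equivalence proved for module names
-- without spaces, see Pre_ below).

-- ===== PORT A =====
-- inner 'for i, line in enumerate(cleaned_lines): … break' — blank the first matching line
def pvBlankFirst (module : String) : List String → List String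
  | [] => []
  | l :: ls =>
    if PySem.Str.strip l == "import " ++ module then "" :: ls
    else if PySem.Str.startswith (PySem.Str.strip l) ("from " ++ module ++ " ") then "" :: ls
    else l :: pvBlankFirst module ls

def fix_unused_imports_specific (content : String) (unused_modules : List String) : String :=
  let lines := (PySem.Str.split? content "\n").getD []
  let cleaned := unused_modules.foldl (fun acc m => pvBlankFirst m acc) lines
  PySem.Str.join "\n" cleaned

-- ===== PORT B =====
-- candidate module named by a line: s[7:] after 'import ', or s[5:] up to the first space after 'from '
def pvCandidate (s : String) : Option String :=
  if PySem.Str.startswith s "import " then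
    some (PySem.Str.slice s (some 7) none)
  else if PySem.Str.startswith s "from " then
    let rest := PySem.Str.slice s (some 5) none
    let j := PySem.Str.find rest " "
    if j ≠ -1 then some (PySem.Str.slice rest none (some j)) else none
  else none

-- single pass over the lines, spending the budget
def pvGoB (budget : PySem.Dict String Int) : List String → List String
  | [] => []
  | l :: ls =>
    match pvCandidate (PySem.Str.strip l) with
    | some m =>
      if budget.getD m 0 > 0 then "" :: pvGoB (budget.modify m 0 (· - 1)) ls
      else l :: pvGoB budget ls
    | none => l :: pvGoB budget ls

def fix_unused_imports_specific_alt (content : String) (unused_modules : List String) : String :=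
  let budget := unused_modules.foldl (fun d m => d.modify m 0 (· + 1)) PySem.Dict.empty
  PySem.Str.join "\n" (pvGoB budget ((PySem.Str.split? content "\n").getD []))

-- ===== PRECONDITION & SPEC =====
-- Pre_ excludes only inputs where a module name containing a space actually prefix-matches a
-- line via A's test f'from {module} ': there one line can match several different modules at
-- once and which lines end up blanked is an accident of A's per-module scan order; both
-- programs still return values on such inputs, so they are left unclaimed.
def Pre_fix_unused_imports_specific (content : String) (unused_modules : List String) : Prop :=
  ∀ m ∈ unused_modules, ' ' ∉ m.toList ∨
    ∀ l ∈ (PySem.Str.split? content "\n").getD [],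
      PySem.Str.startswith (PySem.Str.strip l) ("from " ++ m ++ " ") = false
instance (content : String) (unused_modules : List String) : Decidable (Pre_fix_unused_imports_specific content unused_modules) := by unfold Pre_fix_unused_imports_specific; infer_instance

def pvWitness_fix_unused_imports_specific : String × List String :=
  ("import os\nfrom sys import path\nx = 1", ["os", "sys"])

def Spec_fix_unused_imports_specific (content : String) (unused_modules : List String) (out : String) : Prop := out = fix_unused_imports_specific_alt content unused_modules
instance (content : String) (unused_modules : List String) (out : String) : Decidable (Spec_fix_unused_imports_specific content unused_modules out) := by unfold Spec_fix_unused_imports_specific; infer_instance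

-- ===== CLAIM (what is proved, stated in full; the proofs are below) =====
def Claim_equal_fix_unused_imports_specific : Prop := ∀ (content : String) (unused_modules : List String), Dom_fix_unused_imports_specific content unused_modules → Pre_fix_unused_imports_specific content unused_modules → Spec_fix_unused_imports_specific content unused_modules (fix_unused_imports_specific content unused_modules)

-- ===== LEMMAS AND PROOFS =====

-- the first space in mcs ++ ' ' :: t is at index mcs.length when mcs has no space
lemma pv_find_first_space (mcs t : List Char) (hm : ' ' ∉ mcs) :
    PySem.Chars.find (mcs ++ ' ' :: t) [' '] = (mcs.length : Int) := by
  have hinf : [' '] <:+: (mcs ++ ' ' :: t) := ⟨mcs, t, by simp⟩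
  have h0 : 0 ≤ PySem.Chars.find (mcs ++ ' ' :: t) [' '] :=
    (PySem.Chars.find_nonneg_iff _ _).mpr hinf
  obtain ⟨hpre, hmin⟩ := PySem.Chars.find_spec h0
  have hle : ¬ mcs.length < (PySem.Chars.find (mcs ++ ' ' :: t) [' ']).toNat := by
    intro hlt
    exact hmin mcs.length hlt ⟨t, by simp⟩
  have hge : ¬ (PySem.Chars.find (mcs ++ ' ' :: t) [' ']).toNat < mcs.length := by
    intro hlt
    obtain ⟨u, hu⟩ := hpre
    rw [List.drop_append_of_le_length (Nat.le_of_lt hlt),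
      List.drop_eq_getElem_cons hlt] at hu
    simp only [List.cons_append] at hu
    have : mcs[(PySem.Chars.find (mcs ++ ' ' :: t) [' ']).toNat] = ' ' := by
      exact (List.cons.injEq _ _ _ _ ▸ hu.symm).1.symm ▸ rfl
    exact hm (this ▸ List.getElem_mem hlt)
  have : (PySem.Chars.find (mcs ++ ' ' :: t) [' ']).toNat = mcs.length := by omega
  omega

-- A's two tests succeed for a space-free module m exactly when B's candidate is m
lemma pvCandidate_eq_some_iff (s m : String)
    (hm : ' ' ∉ m.toList ∨ PySem.Str.startswith s ("from " ++ m ++ " ") = false) :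
    pvCandidate s = some m ↔
      ((s == "import " ++ m) = true ∨ PySem.Str.startswith s ("from " ++ m ++ " ") = true) := by
  unfold pvCandidate
  have himp : ("import " : String).toList = ['i','m','p','o','r','t',' '] := rfl
  have hfrom : ("from " : String).toList = ['f','r','o','m',' '] := rfl
  by_cases h1 : PySem.Str.startswith s "import " = true
  · -- import-branch
    rw [if_pos h1]
    obtain ⟨t, ht⟩ := (PySem.Chars.startswith_iff _ _).mp ((PySem.Str.startswith_eq s _).symm ▸ h1)
    have hcand : (PySem.Str.slice s (some 7) none).toList = t := by
      rw [PySem.Str.toList_slice, PySem.Chars.slice_eq_listSlice,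
        PySem.List.slice_from s.toList (by norm_num : (0:Int) ≤ 7), ← ht]
      simp [himp]
    have hc2 : PySem.Str.startswith s ("from " ++ m ++ " ") = false := by
      by_contra hc
      have hc' := (PySem.Chars.startswith_iff _ _).mp
        ((PySem.Str.startswith_eq s _).symm ▸ (Bool.not_eq_false _).mp hc)
      obtain ⟨u, hu⟩ := hc'
      simp only [String.toList_append, hfrom] at hu
      rw [← ht, himp] at hu
      simp at hu
    rw [hc2]
    constructor
    · rintro h
      have hv : (PySem.Str.slice s (some 7) none) = m := by exact Option.some.injEq _ _ ▸ h
      left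
      have htm : t = m.toList := by rw [← hcand, hv]
      have hs : s = "import " ++ m := by
        apply String.toList_inj.mp
        rw [← ht, String.toList_append, himp, htm]
      simp [hs]
    · rintro (h | h)
      · have hs : s = "import " ++ m := by simpa using h
        have : t = m.toList := by
          have := congrArg String.toList hs
          rw [← ht, String.toList_append, himp] at this
          simpa [himp] using this
        exact congrArg some (String.toList_inj.mp (by rw [hcand, this]))
      · simp at h
  · -- not import
    rw [if_neg h1]
    have hc1 : (s == "import " ++ m) = false := by
      by_contra hc
      have hs : s = "import " ++ m := by
        have := (Bool.not_eq_false _).mp hc; simpa using this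
      apply h1
      rw [PySem.Str.startswith_eq]
      apply (PySem.Chars.startswith_iff _ _).mpr
      exact ⟨m.toList, by rw [hs, String.toList_append]⟩
    rw [hc1]
    by_cases h2 : PySem.Str.startswith s "from " = true
    · rw [if_pos h2]
      obtain ⟨t, ht⟩ := (PySem.Chars.startswith_iff _ _).mp ((PySem.Str.startswith_eq s _).symm ▸ h2)
      have hrest : (PySem.Str.slice s (some 5) none).toList = t := by
        rw [PySem.Str.toList_slice, PySem.Chars.slice_eq_listSlice,
          PySem.List.slice_from s.toList (by norm_num : (0:Int) ≤ 5), ← ht]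
        simp [hfrom]
      have hfind : PySem.Str.find (PySem.Str.slice s (some 5) none) " " = PySem.Chars.find t [' '] := by
        rw [PySem.Str.find_eq, hrest]; rfl
      have hsp : (" " : String).toList = [' '] := rfl
      have hsw : PySem.Str.startswith s ("from " ++ m ++ " ") = true ↔ (m.toList ++ [' ']) <+: t := by
        rw [PySem.Str.startswith_eq, PySem.Chars.startswith_iff]
        constructor
        · rintro ⟨u, hu⟩
          refine ⟨u, ?_⟩
          rw [← ht] at hu
          simp only [String.toList_append, hfrom, hsp, List.append_assoc, List.cons_append,
            List.nil_append, List.cons.injEq, true_and] at hu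
          simpa [List.append_assoc] using hu
        · rintro ⟨u, hu⟩
          refine ⟨u, ?_⟩
          rw [← ht, ← hu]
          simp [String.toList_append, hfrom, hsp]
      constructor
      · intro h
        by_cases hj : PySem.Str.find (PySem.Str.slice s (some 5) none) " " ≠ -1
        · rw [if_pos hj] at h
          have hmv : (PySem.Str.slice (PySem.Str.slice s (some 5) none) none
              (some (PySem.Str.find (PySem.Str.slice s (some 5) none) " "))) = m := by
            exact Option.some.injEq _ _ ▸ h
          have hj0 : 0 ≤ PySem.Chars.find t [' '] := by
            rw [← hfind]
            rcases (PySem.Chars.neg_one_le_find t [' ']).lt_or_eq with hlt | heq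
            · omega
            · exfalso; apply hj; rw [hfind]; omega
          obtain ⟨hpre, -⟩ := PySem.Chars.find_spec hj0
          obtain ⟨u, hu⟩ := hpre
          have hmtake : m.toList = t.take (PySem.Chars.find t [' ']).toNat := by
            rw [← hmv, PySem.Str.toList_slice, PySem.Chars.slice_eq_listSlice, hfind,
              PySem.List.slice_to _ hj0, hrest]
          refine Or.inr (hsw.mpr ⟨u, ?_⟩)
          rw [hmtake]
          have hu' : ' ' :: u = List.drop (PySem.Chars.find t [' ']).toNat t := hu
          rw [List.append_assoc, List.singleton_append, hu', List.take_append_drop]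
        · rw [if_neg hj] at h; exact absurd h (by simp)
      · intro h
        rcases h with h | h
        · simp at h
        · obtain ⟨u, hu⟩ := hsw.mp h
          have htm : t = m.toList ++ ' ' :: u := by
            rw [← hu]; simp
          have hm0 : ' ' ∉ m.toList := by
            rcases hm with hm0 | hmf
            · exact hm0
            · rw [h] at hmf; exact absurd hmf (by simp)
          have hfv : PySem.Chars.find t [' '] = (m.toList.length : Int) := by
            rw [htm]; exact pv_find_first_space _ _ hm0
          have hj : PySem.Str.find (PySem.Str.slice s (some 5) none) " " ≠ -1 := by
            rw [hfind, hfv]; omega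
          rw [if_pos hj]
          refine congrArg some (String.toList_inj.mp ?_)
          rw [PySem.Str.toList_slice, PySem.Chars.slice_eq_listSlice, hfind, hfv,
            PySem.List.slice_to _ (by omega : (0:Int) ≤ (m.toList.length : Int)), hrest, htm]
          simp
    · rw [if_neg h2]
      have hc2 : PySem.Str.startswith s ("from " ++ m ++ " ") = false := by
        by_contra hc
        apply h2
        obtain ⟨u, hu⟩ := (PySem.Chars.startswith_iff _ _).mp
          ((PySem.Str.startswith_eq s _).symm ▸ (Bool.not_eq_false _).mp hc)
        rw [PySem.Str.startswith_eq]
        apply (PySem.Chars.startswith_iff _ _).mpr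
        refine ⟨m.toList ++ [' '] ++ u, ?_⟩
        rw [← hu]
        simp [String.toList_append]
      rw [hc2]
      simp

-- the empty line matches no module in either program
lemma pvNoMatch_empty (m : String) :
    (("" : String) == "import " ++ m) = false ∧
      PySem.Str.startswith "" ("from " ++ m ++ " ") = false ∧
      pvCandidate "" = none := by
  refine ⟨?_, ?_, rfl⟩
  · by_contra hc
    have hs : ("" : String) = "import " ++ m := by
      have := (Bool.not_eq_false _).mp hc; simpa using this
    have := congrArg String.toList hs
    simp [String.toList_append] at this
  · by_contra hc
    obtain ⟨u, hu⟩ := (PySem.Chars.startswith_iff _ _).mp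
      ((PySem.Str.startswith_eq _ _).symm ▸ (Bool.not_eq_false _).mp hc)
    simp [String.toList_append] at hu

-- pvGoB only looks at the budget through getD
lemma pvGoB_congr (ls : List String) (d₁ d₂ : PySem.Dict String Int)
    (h : ∀ k, d₁.getD k 0 = d₂.getD k 0) : pvGoB d₁ ls = pvGoB d₂ ls := by
  induction ls generalizing d₁ d₂ with
  | nil => rfl
  | cons l ls ih =>
    cases hc : pvCandidate (PySem.Str.strip l) with
    | none => simp only [pvGoB, hc]; exact congrArg _ (ih _ _ h)
    | some m =>
      simp only [pvGoB, hc]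
      rw [h m]
      by_cases hb : d₂.getD m 0 > 0
      · simp only [if_pos hb]
        refine congrArg _ (ih _ _ ?_)
        intro k
        rw [PySem.Dict.getD_modify, PySem.Dict.getD_modify]
        split <;> simp [h]
      · simp only [if_neg hb]
        exact congrArg _ (ih _ _ h)

lemma pvGoB_empty (ls : List String) : pvGoB PySem.Dict.empty ls = ls := by
  induction ls with
  | nil => rfl
  | cons l ls ih =>
    cases hc : pvCandidate (PySem.Str.strip l) with
    | none => simp only [pvGoB, hc]; rw [ih]
    | some m => simp only [pvGoB, hc]; rw [PySem.Dict.getD_empty]; simp [ih]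

-- adding one unit of budget for m = blanking the first m-line afterwards
lemma pvGoB_step (m : String) (ls : List String)
    (hm : ∀ l ∈ ls, ' ' ∉ m.toList ∨
      PySem.Str.startswith (PySem.Str.strip l) ("from " ++ m ++ " ") = false)
    (d : PySem.Dict String Int) (hd : ∀ k, 0 ≤ d.getD k 0) :
    pvGoB (d.modify m 0 (· + 1)) ls = pvBlankFirst m (pvGoB d ls) := by
  revert hm hd
  induction ls generalizing d with
  | nil => intro _ _; rfl
  | cons l ls ih =>
    intro hm hd
    have hml := hm l (by simp)
    have hmtl : ∀ l' ∈ ls, ' ' ∉ m.toList ∨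
        PySem.Str.startswith (PySem.Str.strip l') ("from " ++ m ++ " ") = false :=
      fun l' hl' => hm l' (by simp [hl'])
    cases hc : pvCandidate (PySem.Str.strip l) with
    | none =>
      have hno : ¬ ((PySem.Str.strip l == "import " ++ m) = true ∨
          PySem.Str.startswith (PySem.Str.strip l) ("from " ++ m ++ " ") = true) := by
        intro hcond
        rw [← pvCandidate_eq_some_iff _ _ hml] at hcond
        rw [hc] at hcond; exact absurd hcond (by simp)
      rw [not_or] at hno
      simp only [pvGoB, hc, pvBlankFirst]
      rw [if_neg (by simpa using hno.1), if_neg (by simpa using hno.2)]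
      exact congrArg _ (ih d hmtl hd)
    | some m' =>
      simp only [pvGoB, hc]
      by_cases hmm : m' = m
      · subst hmm
        have hmatch := (pvCandidate_eq_some_iff _ _ hml).mp hc
        have hb1 : (d.modify m' 0 (· + 1)).getD m' 0 > 0 := by
          rw [PySem.Dict.getD_modify, if_pos rfl]
          have := hd m'; omega
        rw [if_pos hb1]
        have hLtail : pvGoB ((d.modify m' 0 (· + 1)).modify m' 0 (· - 1)) ls = pvGoB d ls := by
          apply pvGoB_congr
          intro k
          by_cases hk : k = m' <;> simp [PySem.Dict.getD_modify, hk]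
        rw [hLtail]
        by_cases hg : d.getD m' 0 > 0
        · rw [if_pos hg]
          simp only [pvBlankFirst]
          obtain ⟨he1, he2, -⟩ := pvNoMatch_empty m'
          rw [show PySem.Str.strip "" = "" from rfl, he1, he2,
            if_neg (by simp : ¬ (false = true)), if_neg (by simp : ¬ (false = true))]
          have hd2 : ∀ k, 0 ≤ (d.modify m' 0 (· - 1)).getD k 0 := by
            intro k; rw [PySem.Dict.getD_modify]
            split
            · omega
            · exact hd k
          rw [← ih _ hmtl hd2]
          refine congrArg _ (pvGoB_congr _ _ _ ?_)
          intro k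
          by_cases hk : k = m' <;> simp [PySem.Dict.getD_modify, hk]
        · rw [if_neg hg]
          simp only [pvBlankFirst]
          rcases hmatch with hcond | hcond
          · rw [if_pos hcond]
          · by_cases hcond1 : (PySem.Str.strip l == "import " ++ m') = true
            · rw [if_pos hcond1]
            · rw [if_neg hcond1, if_pos hcond]
      · have hno : ¬ ((PySem.Str.strip l == "import " ++ m) = true ∨
            PySem.Str.startswith (PySem.Str.strip l) ("from " ++ m ++ " ") = true) := by
          intro hcond
          rw [← pvCandidate_eq_some_iff _ _ hml, hc] at hcond
          exact hmm (Option.some.injEq _ _ ▸ hcond)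
        rw [not_or] at hno
        rw [PySem.Dict.getD_modify, if_neg hmm]
        by_cases hg : d.getD m' 0 > 0
        · rw [if_pos hg, if_pos hg]
          simp only [pvBlankFirst]
          obtain ⟨he1, he2, -⟩ := pvNoMatch_empty m
          rw [show PySem.Str.strip "" = "" from rfl, he1, he2,
            if_neg (by simp : ¬ (false = true)), if_neg (by simp : ¬ (false = true))]
          have hd2 : ∀ k, 0 ≤ (d.modify m' 0 (· - 1)).getD k 0 := by
            intro k; rw [PySem.Dict.getD_modify]
            split
            · omega
            · exact hd k
          rw [← ih _ hmtl hd2]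
          refine congrArg _ (pvGoB_congr _ _ _ ?_)
          intro k
          by_cases hk1 : k = m' <;> by_cases hk2 : k = m <;>
            simp [PySem.Dict.getD_modify, hk1, hk2] <;> simp_all
        · rw [if_neg hg, if_neg hg]
          simp only [pvBlankFirst]
          rw [if_neg (by simpa using hno.1), if_neg (by simpa using hno.2)]
          exact congrArg _ (ih d hmtl hd)

lemma pvGoB_foldl (ms : List String) (ls : List String)
    (h : ∀ m ∈ ms, ∀ l ∈ ls, ' ' ∉ m.toList ∨
      PySem.Str.startswith (PySem.Str.strip l) ("from " ++ m ++ " ") = false)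
    (d : PySem.Dict String Int) (hd : ∀ k, 0 ≤ d.getD k 0) :
    pvGoB (ms.foldl (fun d m => d.modify m 0 (· + 1)) d) ls
      = ms.foldl (fun acc m => pvBlankFirst m acc) (pvGoB d ls) := by
  revert h hd
  induction ms generalizing d with
  | nil => intro _ _; rfl
  | cons m ms ih =>
    intro h hd
    have hd' : ∀ k, 0 ≤ (d.modify m 0 (· + 1)).getD k 0 := by
      intro k
      rw [PySem.Dict.getD_modify]
      split
      · have := hd m; omega
      · exact hd k
    simp only [List.foldl_cons]
    rw [ih _ (fun x hx => h x (by simp [hx])) hd',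
      pvGoB_step m ls (h m (by simp)) d hd]

-- ===== VERDICT (by name: the statement is the Claim_ definition above) =====
theorem fix_unused_imports_specific_spec : Claim_equal_fix_unused_imports_specific := by
  intro content ms _ hpre
  unfold Spec_fix_unused_imports_specific fix_unused_imports_specific fix_unused_imports_specific_alt
  simp only
  rw [pvGoB_foldl ms _ (fun m hm l hl => (hpre m hm).imp id (fun hf => hf l hl))
    PySem.Dict.empty (by intro k; simp [PySem.Dict.getD_empty]), pvGoB_empty]
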